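-- pv_equiv track=rewrite | github.com/pypi-data/pypi-mirror-403 | packages/datannurpy/datannurpy-0.4.0-py3-none-any.whl/datannurpy/utils/prefix.py | get_table_prefix
-- ===== SOURCE A (Python) =====
-- def get_table_prefix(
--     table_name: str,
--     valid_prefixes: set[str],
--     sep: str = "_",
-- ) -> str | None:
--     """Find the most specific (longest) prefix folder for a table."""
--     parts = table_name.split(sep)
--     # Try longest prefix first
--     for i in range(len(parts) - 1, 0, -1):
--         candidate = sep.join(parts[:i])
--         if candidate in valid_prefixes:
--             return candidate
--     return None
-- ===== SOURCE B (Python) =====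
-- def get_table_prefix(
--     table_name: str,
--     valid_prefixes: set[str],
--     sep: str = "_",
-- ) -> str | None:
--     """Find the most specific (longest) prefix folder for a table."""
--     parts = table_name.split(sep)
--     # Build the set of all proper sep-joined prefixes of the name.
--     candidates = set()
--     acc = None
--     for part in parts[:-1]:
--         acc = part if acc is None else acc + sep + part
--         candidates.add(acc)
--     # Scan the valid set, keeping the longest genuine candidate.
--     best = None
--     for p in valid_prefixes:
--         if p in candidates and (best is None or len(p) > len(best)):
--             best = p
--     return best
-- ===== Notes on version B (the rewrite author's own statement) =====
-- stated objective: alternative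
-- what changed: A generates the name's sep-joined prefixes longest-first and probes the valid set with an early return; B builds the set of all proper joined prefixes in one forward scan and then iterates over valid_prefixes, keeping the longest member of that candidate set (order-independent since candidate lengths are strictly increasing).
import Mathlib
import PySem

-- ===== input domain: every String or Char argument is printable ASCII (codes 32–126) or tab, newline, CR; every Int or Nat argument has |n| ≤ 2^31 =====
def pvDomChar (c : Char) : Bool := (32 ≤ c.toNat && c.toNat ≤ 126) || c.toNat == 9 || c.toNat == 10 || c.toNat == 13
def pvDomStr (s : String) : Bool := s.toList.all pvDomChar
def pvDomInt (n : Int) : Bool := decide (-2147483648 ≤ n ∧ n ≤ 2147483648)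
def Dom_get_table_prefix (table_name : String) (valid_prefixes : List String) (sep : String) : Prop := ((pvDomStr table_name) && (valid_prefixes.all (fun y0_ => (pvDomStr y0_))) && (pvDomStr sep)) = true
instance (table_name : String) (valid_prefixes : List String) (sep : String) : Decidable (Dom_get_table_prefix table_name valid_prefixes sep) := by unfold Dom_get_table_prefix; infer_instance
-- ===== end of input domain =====

-- B replaces A's longest-first probe of the valid set by one forward pass building all joined
-- prefixes and one pass over valid_prefixes keeping the longest genuine candidate (alternative
-- decomposition, similar cost). Equivalence proved for every nonempty separator.

-- ===== PORT A =====
-- the 'for i in range(len(parts)-1, 0, -1)' loop, with its early return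
def pvALoop (valid : PySem.Set String) (sep : String) (parts : List String) : List Int → Option String
  | [] => none
  | i :: rest =>
    let candidate := PySem.Str.join sep (PySem.List.slice parts none (some i))
    if PySem.Set.contains valid candidate then some candidate
    else pvALoop valid sep parts rest

def get_table_prefix (table_name : String) (valid_prefixes : List String) (sep : String) : Option String :=
  match PySem.Str.split? table_name sep with
  | none => none   -- empty separator: split raises ValueError (excluded by Pre_)
  | some parts => pvALoop valid_prefixes sep parts (PySem.List.pyRange (PySem.List.len parts - 1) 0 (-1))

-- ===== PORT B =====
-- one step of B's first loop: update acc and add it to the candidate set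
def pvBStep (sep : String) (st : Option String × PySem.Set String) (part : String) : Option String × PySem.Set String :=
  let acc := match st.1 with | none => part | some a => a ++ sep ++ part
  (some acc, PySem.Set.add st.2 acc)

-- one step of B's second loop: keep the longest valid candidate seen so far
def pvBBest (cands : PySem.Set String) (best : Option String) (p : String) : Option String :=
  if PySem.Set.contains cands p
      && (match best with | none => true | some b => decide (PySem.Str.len b < PySem.Str.len p)) then
    some p
  else best

def get_table_prefix_alt (table_name : String) (valid_prefixes : List String) (sep : String) : Option String :=
  match PySem.Str.split? table_name sep with
  | none => none   -- empty separator: split raises ValueError (excluded by Pre_)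
  | some parts =>
    let st := (PySem.List.slice parts none (some (-1))).foldl (pvBStep sep) (none, PySem.Set.empty)
    valid_prefixes.foldl (pvBBest st.2) none

-- ===== PRECONDITION & SPEC =====
-- Pre_ excludes only sep = "", where Python's str.split raises ValueError (in A and in B alike).
def Pre_get_table_prefix (table_name : String) (valid_prefixes : List String) (sep : String) : Prop := sep ≠ ""
instance (table_name : String) (valid_prefixes : List String) (sep : String) : Decidable (Pre_get_table_prefix table_name valid_prefixes sep) := by unfold Pre_get_table_prefix; infer_instance
def pvWitness_get_table_prefix : String × List String × String := ("a_b", ["a"], "_")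

def Spec_get_table_prefix (table_name : String) (valid_prefixes : List String) (sep : String) (out : Option String) : Prop := out = get_table_prefix_alt table_name valid_prefixes sep
instance (table_name : String) (valid_prefixes : List String) (sep : String) (out : Option String) : Decidable (Spec_get_table_prefix table_name valid_prefixes sep out) := by unfold Spec_get_table_prefix; infer_instance

-- ===== CLAIM (what is proved, stated in full; the proofs are below) =====
def Claim_equal_get_table_prefix : Prop := ∀ (table_name : String) (valid_prefixes : List String) (sep : String), Dom_get_table_prefix table_name valid_prefixes sep → Pre_get_table_prefix table_name valid_prefixes sep → Spec_get_table_prefix table_name valid_prefixes sep (get_table_prefix table_name valid_prefixes sep)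

-- ===== LEMMAS AND PROOFS =====

-- the k-th joined prefix of the split name
def pvCand (sep : String) (parts : List String) (k : Nat) : String :=
  PySem.Str.join sep (parts.take k)

-- the list of running joins B's first loop produces after acc = a
def pvScan (sep a : String) : List String → List String
  | [] => []
  | p :: rest => (a ++ sep ++ p) :: pvScan sep (a ++ sep ++ p) rest

def pvLastAcc (sep a : String) (l : List String) : String :=
  l.foldl (fun x p => x ++ sep ++ p) a

-- "r is the longest element of cs satisfying S (none if there is none)"
def pvGood (cs : List String) (S : String → Prop) (r : Option String) : Prop :=
  match r with
  | none => ∀ c ∈ cs, ¬ S c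
  | some c => c ∈ cs ∧ S c ∧ ∀ c' ∈ cs, S c' → c'.toList.length ≤ c.toList.length

lemma pvJoin_append (sep x₀ x : List Char) (xs : List (List Char)) :
    PySem.Chars.join sep ((x₀ :: xs) ++ [x]) = PySem.Chars.join sep (x₀ :: xs) ++ sep ++ x := by
  induction xs generalizing x₀ with
  | nil => simp [PySem.Chars.join_cons_cons, PySem.Chars.join_singleton]
  | cons y ys ih =>
    have h := ih y
    simp only [List.cons_append] at h ⊢
    rw [PySem.Chars.join_cons_cons, PySem.Chars.join_cons_cons, h]
    simp [List.append_assoc]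

lemma pvCand_succ (sep : String) (parts : List String) (k : Nat)
    (h1 : 1 ≤ k) (h2 : k < parts.length) :
    pvCand sep parts (k + 1) = pvCand sep parts k ++ sep ++ parts[k] := by
  apply String.toList_inj.mp
  have htake : parts.take (k+1) = parts.take k ++ [parts[k]] := by
    rw [List.take_add_one]; simp [List.getElem?_eq_getElem h2]
  have hne : parts.take k ≠ [] := by
    intro h; have := List.length_take_of_le (le_of_lt h2) ▸ congrArg List.length h; simp at this; omega
  obtain ⟨q, qs, hq⟩ := List.exists_cons_of_ne_nil hne
  simp only [pvCand, PySem.Str.toList_join, String.toList_append, htake, hq]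
  have := pvJoin_append sep.toList q.toList parts[k].toList (qs.map String.toList)
  simp only [List.cons_append] at this
  simpa using this

lemma pvCand_one (sep : String) (p : String) (rest : List String) :
    pvCand sep (p :: rest) 1 = p := by
  apply String.toList_inj.mp
  simp [pvCand, PySem.Str.toList_join, PySem.Chars.join_singleton]

lemma pvSepPos (sep : String) (hsep : sep ≠ "") : 0 < sep.toList.length := by
  rcases Nat.eq_zero_or_pos sep.toList.length with h | h
  · exact absurd (String.toList_inj.mp (by simpa using List.length_eq_zero_iff.mp h)) hsep
  · exact h

lemma pvAppLen (a sep p : String) :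
    (a ++ sep ++ p).toList.length = a.toList.length + sep.toList.length + p.toList.length := by
  simp [String.toList_append]; omega

lemma pvCand_step_lt (sep : String) (parts : List String) (hsep : sep ≠ "") (k : Nat)
    (h1 : 1 ≤ k) (h2 : k < parts.length) :
    (pvCand sep parts k).toList.length < (pvCand sep parts (k+1)).toList.length := by
  rw [pvCand_succ sep parts k h1 h2, pvAppLen]
  have := pvSepPos sep hsep
  omega

lemma pvCand_len_lt (sep : String) (parts : List String) (hsep : sep ≠ "") :
    ∀ j k, 1 ≤ j → j < k → k ≤ parts.length →
      (pvCand sep parts j).toList.length < (pvCand sep parts k).toList.length := by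
  intro j k hj hjk hk
  induction k with
  | zero => omega
  | succ n ih =>
    rcases Nat.lt_or_ge j n with h | h
    · exact lt_trans (ih h (by omega)) (pvCand_step_lt sep parts hsep n (by omega) (by omega))
    · have : j = n := by omega
      subst this
      exact pvCand_step_lt sep parts hsep j hj (by omega)

lemma pvCand_len_le (sep : String) (parts : List String) (hsep : sep ≠ "") :
    ∀ j k, 1 ≤ j → j ≤ k → k ≤ parts.length →
      (pvCand sep parts j).toList.length ≤ (pvCand sep parts k).toList.length := by
  intro j k h1 h2 h3
  rcases eq_or_lt_of_le h2 with rfl | h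
  · exact le_refl _
  · exact le_of_lt (pvCand_len_lt sep parts hsep j k h1 h h3)

lemma pvRange_neg (m : Nat) :
    PySem.List.pyRange (m:Int) 0 (-1) = (List.range m).map (fun k : Nat => (m:Int) - (k:Int)) := by
  simp [PySem.List.pyRange]
  split
  · apply List.map_congr_left
    intro k hk
    omega
  · rename_i h
    have hm : m = 0 := by omega
    subst hm; simp

lemma pvRange_neg_one_cons (k : Nat) :
    PySem.List.pyRange ((k:Int) + 1) 0 (-1) = ((k:Int) + 1) :: PySem.List.pyRange (k:Int) 0 (-1) := by
  have h1 : ((k:Int) + 1) = ((k+1 : Nat) : Int) := by push_cast; ring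
  rw [h1, pvRange_neg, pvRange_neg, List.range_succ_eq_map]
  rw [List.map_cons, List.map_map]
  congr 1
  apply List.map_congr_left; intro a ha
  simp only [Function.comp_apply, Nat.succ_eq_add_one]
  push_cast; ring

lemma pvGood_snoc (cs : List String) (S : String → Prop) (x : String) (r : Option String)
    (hx : ¬ S x) : pvGood cs S r → pvGood (cs ++ [x]) S r := by
  cases r with
  | none =>
    intro h c hc
    rcases List.mem_append.mp hc with h' | h'
    · exact h c h'
    · simp at h'; subst h'; exact hx
  | some c =>
    rintro ⟨hc, hS, hb⟩
    refine ⟨List.mem_append_left _ hc, hS, fun c' hc' hS' => ?_⟩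
    rcases List.mem_append.mp hc' with h' | h'
    · exact hb c' h' hS'
    · simp at h'; subst h'; exact absurd hS' hx

-- A's loop computes the longest valid candidate among pvCand 1 .. pvCand k
lemma pvALoop_good (vp : List String) (sep : String) (parts : List String) (hsep : sep ≠ "") :
    ∀ k, k ≤ parts.length →
      pvGood ((List.range' 1 k).map (pvCand sep parts)) (· ∈ vp)
        (pvALoop vp sep parts (PySem.List.pyRange (k:Int) 0 (-1))) := by
  intro k
  induction k with
  | zero =>
    intro _
    have h0 : PySem.List.pyRange (((0:Nat)):Int) 0 (-1) = [] := by
      rw [pvRange_neg 0]; simp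
    rw [h0]
    intro c hc
    simp at hc
  | succ k ih =>
    intro hk
    rw [show (((k+1):Nat):Int) = (k:Int)+1 by push_cast; ring, pvRange_neg_one_cons]
    show pvGood _ _ (pvALoop vp sep parts (((k:Int)+1) :: PySem.List.pyRange (k:Int) 0 (-1)))
    rw [pvALoop]
    have hsl : PySem.List.slice parts none (some ((k:Int)+1)) = parts.take (k+1) := by
      rw [show ((k:Int)+1) = (((k+1):Nat):Int) by push_cast; ring]
      exact PySem.List.slice_to_natCast parts (k+1)
    rw [hsl]
    have hcand : PySem.Str.join sep (parts.take (k+1)) = pvCand sep parts (k+1) := rfl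
    rw [hcand]
    have hconc : List.range' 1 (k+1) = List.range' 1 k ++ [1+k] := by
      simpa using List.range'_concat (s:=1) (n:=k) (step:=1)
    by_cases hmem : pvCand sep parts (k+1) ∈ vp
    · rw [if_pos ((PySem.Set.contains_iff vp _).mpr hmem)]
      refine ⟨?_, hmem, ?_⟩
      · rw [hconc]
        simp [show 1+k = k+1 by omega]
      · intro c' hc' hS'
        rcases List.mem_map.mp hc' with ⟨j, hj, rfl⟩
        rcases List.mem_range'_1.mp hj with ⟨h1j, hj2⟩
        exact pvCand_len_le sep parts hsep j (k+1) h1j (by omega) hk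
    · rw [if_neg (by rw [PySem.Set.contains_iff]; exact hmem)]
      have := ih (by omega)
      rw [hconc, List.map_append]
      apply pvGood_snoc
      · simpa [show 1+k = k+1 by omega] using hmem
      · exact this

lemma pvGood_congr (cs : List String) (S T : String → Prop) (r : Option String)
    (h : ∀ c ∈ cs, (S c ↔ T c)) : pvGood cs S r → pvGood cs T r := by
  cases r with
  | none => intro hg c hc hT; exact hg c hc ((h c hc).mpr hT)
  | some c =>
    rintro ⟨hc, hS, hb⟩
    exact ⟨hc, (h c hc).mp hS, fun c' hc' hT => hb c' hc' ((h c' hc').mpr hT)⟩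

lemma pvBBest_step (cs : List String) (S : String → Prop) (best : Option String) (p : String)
    (h : pvGood cs S best) : pvGood cs (fun c => S c ∨ c = p) (pvBBest cs best p) := by
  unfold pvBBest
  by_cases hp : p ∈ cs
  · cases best with
    | none =>
      rw [if_pos (by simp [PySem.Set.contains_iff, hp])]
      exact ⟨hp, Or.inr rfl, fun c' hc' hS' => by
        rcases hS' with h' | h'
        · exact absurd h' (h c' hc')
        · subst h'; exact le_refl _⟩
    | some b =>
      obtain ⟨hbmem, hbS, hbb⟩ := h
      by_cases hlt : b.toList.length < p.toList.length
      · rw [if_pos (by simp [PySem.Set.contains_iff, hp, PySem.Str.len_eq]; exact_mod_cast hlt)]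
        exact ⟨hp, Or.inr rfl, fun c' hc' hS' => by
          rcases hS' with h' | h'
          · exact le_trans (hbb c' hc' h') (le_of_lt hlt)
          · subst h'; exact le_refl _⟩
      · rw [if_neg (by simp [PySem.Set.contains_iff, hp, PySem.Str.len_eq]; simpa [String.length_toList] using hlt)]
        exact ⟨hbmem, Or.inl hbS, fun c' hc' hS' => by
          rcases hS' with h' | h'
          · exact hbb c' hc' h'
          · subst h'; exact not_lt.mp hlt⟩
  · rw [if_neg (by simp [PySem.Set.contains_iff, hp])]
    cases best with
    | none =>
      intro c hc hS
      rcases hS with h' | h'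
      · exact h c hc h'
      · subst h'; exact hp hc
    | some b =>
      obtain ⟨hbmem, hbS, hbb⟩ := h
      exact ⟨hbmem, Or.inl hbS, fun c' hc' hS' => by
        rcases hS' with h' | h'
        · exact hbb c' hc' h'
        · subst h'; exact absurd hc' hp⟩

-- B's second loop preserves pvGood, extending S by the scanned elements
lemma pvBBest_good (cs : List String) :
    ∀ (vp : List String) (best : Option String) (S : String → Prop), pvGood cs S best →
      pvGood cs (fun c => S c ∨ c ∈ vp) (vp.foldl (pvBBest cs) best) := by
  intro vp
  induction vp with
  | nil =>
    intro best S h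
    simp only [List.foldl_nil]
    exact pvGood_congr cs S _ best (by simp) h
  | cons p rest ih =>
    intro best S h
    simp only [List.foldl_cons]
    have h1 := pvBBest_step cs S best p h
    have h2 := ih (pvBBest cs best p) _ h1
    refine pvGood_congr cs _ _ _ (fun c _ => ?_) h2
    simp [or_assoc]

lemma pvLenInj (cs : List String)
    (hpw : cs.Pairwise (fun x y => x.toList.length < y.toList.length)) :
    ∀ a ∈ cs, ∀ b ∈ cs, a.toList.length = b.toList.length → a = b := by
  induction cs with
  | nil => simp
  | cons x xs ih =>
    obtain ⟨hx, hxs⟩ := List.pairwise_cons.mp hpw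
    intro a ha b hb hab
    rcases List.mem_cons.mp ha with rfl | ha' <;> rcases List.mem_cons.mp hb with rfl | hb'
    · rfl
    · exact absurd hab (by have := hx b hb'; omega)
    · exact absurd hab (by have := hx a ha'; omega)
    · exact ih hxs a ha' b hb' hab

lemma pvGood_unique (cs : List String) (S : String → Prop)
    (hpw : cs.Pairwise (fun x y => x.toList.length < y.toList.length))
    (r₁ r₂ : Option String) (h₁ : pvGood cs S r₁) (h₂ : pvGood cs S r₂) : r₁ = r₂ := by
  cases r₁ with
  | none =>
    cases r₂ with
    | none => rfl
    | some c₂ => obtain ⟨hc, hS, _⟩ := h₂; exact absurd hS (h₁ c₂ hc)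
  | some c₁ =>
    cases r₂ with
    | none => obtain ⟨hc, hS, _⟩ := h₁; exact absurd hS (h₂ c₁ hc)
    | some c₂ =>
      obtain ⟨hc₁, hS₁, hb₁⟩ := h₁
      obtain ⟨hc₂, hS₂, hb₂⟩ := h₂
      have hlen : c₁.toList.length = c₂.toList.length :=
        le_antisymm (hb₂ c₁ hc₁ hS₁) (hb₁ c₂ hc₂ hS₂)
      exact congrArg some (pvLenInj cs hpw c₁ hc₁ c₂ hc₂ hlen)

-- B's first loop appends exactly the running joins, in order
lemma pvBStep_fold (sep : String) (hsep : sep ≠ "") :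
    ∀ (l : List String) (a : String) (cs : List String),
      (∀ x ∈ cs, x.toList.length ≤ a.toList.length) →
      l.foldl (pvBStep sep) (some a, cs) = (some (pvLastAcc sep a l), cs ++ pvScan sep a l) := by
  intro l
  induction l with
  | nil => intro a cs _; simp [pvScan, pvLastAcc]
  | cons p rest ih =>
    intro a cs hinv
    have hnotmem : (a ++ sep ++ p) ∉ cs := by
      intro hmem
      have h1 := hinv _ hmem
      have h2 := pvSepPos sep hsep
      have h3 := pvAppLen a sep p
      omega
    have hstep : pvBStep sep (some a, cs) p = (some (a ++ sep ++ p), cs ++ [a ++ sep ++ p]) := by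
      simp [pvBStep, PySem.Set.add_of_not_mem hnotmem]
    rw [List.foldl_cons, hstep]
    have hinv' : ∀ x ∈ cs ++ [a ++ sep ++ p], x.toList.length ≤ (a ++ sep ++ p).toList.length := by
      intro x hx
      rcases List.mem_append.mp hx with h' | h'
      · have := hinv x h'
        rw [pvAppLen]
        omega
      · simp at h'; subst h'; exact le_refl _
    rw [ih (a ++ sep ++ p) (cs ++ [a ++ sep ++ p]) hinv']
    simp [pvScan, pvLastAcc, List.append_assoc]

-- the scan list is exactly the candidate list
lemma pvScan_eq_cand (sep : String) (parts : List String) :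
    ∀ (d j : Nat), 1 ≤ j → j + d = parts.length - 1 →
      pvScan sep (pvCand sep parts j) ((parts.dropLast).drop j)
        = (List.range' (j+1) d).map (pvCand sep parts) := by
  intro d
  induction d with
  | zero =>
    intro j h1 h2
    have : (parts.dropLast).drop j = [] := by
      apply List.drop_eq_nil_of_le
      rw [List.length_dropLast]; omega
    rw [this]
    simp [pvScan]
  | succ d ih =>
    intro j h1 h2
    have hjlt : j < parts.dropLast.length := by rw [List.length_dropLast]; omega
    have hjp : j < parts.length := by omega
    have hdrop : (parts.dropLast).drop j = parts.dropLast[j] :: (parts.dropLast).drop (j+1) :=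
      List.drop_eq_getElem_cons hjlt
    have hget : parts.dropLast[j] = parts[j] := List.getElem_dropLast (xs:=parts) hjlt
    rw [hdrop, hget]
    show (pvCand sep parts j ++ sep ++ parts[j]) :: pvScan sep (pvCand sep parts j ++ sep ++ parts[j]) _ = _
    rw [← pvCand_succ sep parts j h1 hjp]
    rw [ih (j+1) (by omega) (by omega)]
    rw [List.range'_succ, List.map_cons]

-- the candidate set built by B's first loop is exactly the candidate list A probes
lemma pvCands_eq (sep : String) (parts : List String) (hsep : sep ≠ "") (hne : parts ≠ []) :
    ((parts.dropLast).foldl (pvBStep sep) (none, PySem.Set.empty)).2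
      = (List.range' 1 (parts.length - 1)).map (pvCand sep parts) := by
  match parts, hne with
  | p0 :: ptl, _ =>
    cases ptl with
    | nil => simp [pvBStep]
    | cons p1 ptl' =>
      have hdl : (p0 :: p1 :: ptl').dropLast = p0 :: (p1 :: ptl').dropLast := rfl
      rw [hdl, List.foldl_cons]
      have hstep0 : pvBStep sep (none, PySem.Set.empty) p0 = (some p0, [p0]) := by
        simp [pvBStep, PySem.Set.empty, PySem.Set.add_of_not_mem (List.not_mem_nil)]
      rw [hstep0]
      rw [pvBStep_fold sep hsep _ p0 [p0] (by intro x hx; simp at hx; subst hx; exact le_refl _)]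
      have h1 : p0 = pvCand sep (p0 :: p1 :: ptl') 1 := (pvCand_one sep p0 (p1 :: ptl')).symm
      have hdrop1 : (p1 :: ptl').dropLast = ((p0 :: p1 :: ptl').dropLast).drop 1 := by rw [hdl]; rfl
      have hscan := pvScan_eq_cand sep (p0 :: p1 :: ptl') ((p1 :: ptl').length - 1) 1
        (le_refl 1) (by simp only [List.length_cons]; omega)
      rw [← h1, ← hdrop1] at hscan
      have hr : List.range' 1 ((p0 :: p1 :: ptl').length - 1)
          = 1 :: List.range' 2 ((p1 :: ptl').length - 1) := by
        have he : (p0 :: p1 :: ptl').length - 1 = ((p1 :: ptl').length - 1) + 1 := by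
          simp only [List.length_cons]; omega
        rw [he, List.range'_succ]
      rw [hscan, hr, List.map_cons]
      rw [← h1]
      rfl

-- pairwise strictly increasing lengths of the candidate list
lemma pvCandList_pairwise (sep : String) (parts : List String) (hsep : sep ≠ "") :
    ((List.range' 1 (parts.length - 1)).map (pvCand sep parts)).Pairwise
      (fun x y => x.toList.length < y.toList.length) := by
  rw [List.pairwise_map]
  apply List.Pairwise.imp_of_mem (R := fun a b => a < b)
  · intro j k hj hk hjk
    rcases List.mem_range'_1.mp hj with ⟨h1j, hj2⟩
    rcases List.mem_range'_1.mp hk with ⟨h1k, hk2⟩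
    exact pvCand_len_lt sep parts hsep j k h1j hjk (by omega)
  · exact List.pairwise_lt_range'

-- ===== VERDICT (by name: the statement is the Claim_ definition above) =====
theorem get_table_prefix_spec : Claim_equal_get_table_prefix := by
  intro tn vp sep _ hsep
  unfold Spec_get_table_prefix get_table_prefix get_table_prefix_alt
  cases hsplit : PySem.Str.split? tn sep with
  | none => rfl
  | some parts =>
    simp only []
    rw [PySem.List.len_eq, PySem.List.slice_to_neg_one]
    cases parts with
    | nil =>
      have h0 : PySem.List.pyRange ((0:Int) - 1) 0 (-1) = [] := by decide
      simp only [List.length_nil, Nat.cast_zero, h0, List.dropLast_nil, List.foldl_nil, pvALoop]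
      have hB := pvBBest_good (((none, PySem.Set.empty) : Option String × PySem.Set String)).2
        vp none (fun _ => False) (by intro c hc; simp [PySem.Set.empty] at hc)
      cases hres : vp.foldl (pvBBest (((none, PySem.Set.empty) : Option String × PySem.Set String)).2) none with
      | none => rfl
      | some c =>
        rw [hres] at hB
        obtain ⟨hc, _, _⟩ := hB
        simp [PySem.Set.empty] at hc
    | cons p0 ptl =>
      set parts := p0 :: ptl with hparts
      have hnn : parts ≠ [] := by simp [hparts]
      have hlen1 : 1 ≤ parts.length := by simp [hparts]
      have hcast : (↑parts.length - 1 : Int) = ((parts.length - 1 : Nat) : Int) := by omega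
      rw [hcast]
      set CL := (List.range' 1 (parts.length - 1)).map (pvCand sep parts) with hCL
      have hA := pvALoop_good vp sep parts hsep (parts.length - 1) (by omega)
      have hcs := pvCands_eq sep parts hsep hnn
      rw [hcs]
      have hB0 : pvGood CL (fun _ => False) none := by intro c hc; simp
      have hB := pvBBest_good CL vp none (fun _ => False) hB0
      have hB' : pvGood CL (· ∈ vp) (vp.foldl (pvBBest CL) none) :=
        pvGood_congr CL _ _ _ (fun c _ => by simp) hB
      exact pvGood_unique CL (· ∈ vp) (pvCandList_pairwise sep parts hsep) _ _ hA hB'
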